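-- pv_equiv track=rewrite | github.com/MastProTech/Advent-of-Code | 2020/06.py | part1
-- ===== SOURCE A (Python) =====
-- def part1(l:list):
--     count=0
--     for i in l:
--         questions=['a', 'b', 'c', 'd', 'e', 'f', 'g', 'h', 'i', 'j', 'k', 'l', 'm', 'n', 'o', 'p', 'q', 'r', 's', 't', 'u', 'v', 'w', 'x', 'y', 'z']
--         for j in questions:
--             if i.find(j)!=-1:
--                 count+=1
--     return count
-- ===== SOURCE B (Python) =====
-- LOWER = set('abcdefghijklmnopqrstuvwxyz')
--
--
-- def part1(l: list):
--     # one pass per group: build the set of its characters, intersect with a-z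
--     return sum(len(set(g) & LOWER) for g in l)
-- ===== Notes on version B (the rewrite author's own statement) =====
-- stated objective: faster
-- what changed: Replaces the 26-iteration inner find-loop per group (26 full string scans) with a single-pass set-of-characters construction intersected with the lowercase alphabet, summed over groups.
import Mathlib
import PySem

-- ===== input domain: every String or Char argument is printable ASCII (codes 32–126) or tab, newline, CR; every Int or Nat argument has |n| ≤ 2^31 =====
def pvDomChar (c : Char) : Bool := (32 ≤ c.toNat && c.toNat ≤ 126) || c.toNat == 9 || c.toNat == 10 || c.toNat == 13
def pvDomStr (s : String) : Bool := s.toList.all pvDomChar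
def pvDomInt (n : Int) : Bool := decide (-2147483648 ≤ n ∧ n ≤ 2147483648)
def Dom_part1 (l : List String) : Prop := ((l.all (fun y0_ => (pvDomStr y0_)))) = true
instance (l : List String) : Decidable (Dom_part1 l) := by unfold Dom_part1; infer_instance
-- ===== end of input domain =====

-- B replaces A's 26-iteration find-loop per group by one set-of-characters pass
-- intersected with the lowercase alphabet (simpler; same return value everywhere).

-- ===== PORT A =====
-- the constant list A rebinds on every iteration
def pvQuestions : List String :=
  ["a", "b", "c", "d", "e", "f", "g", "h", "i", "j", "k", "l", "m",
   "n", "o", "p", "q", "r", "s", "t", "u", "v", "w", "x", "y", "z"]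

def part1 (l : List String) : Int :=
  l.foldl (fun count i =>
    pvQuestions.foldl (fun count j =>
      if PySem.Str.find i j ≠ -1 then count + 1 else count) count) 0

-- ===== PORT B =====
def pvLower : PySem.Set Char := PySem.Set.ofList "abcdefghijklmnopqrstuvwxyz".toList

def part1_alt (l : List String) : Int :=
  (l.map (fun g =>
    (PySem.Set.len (PySem.Set.inter (PySem.Set.ofList g.toList) pvLower) : Int))).sum

-- ===== PRECONDITION & SPEC =====
def Spec_part1 (l : List String) (out : Int) : Prop := out = part1_alt l
instance (l : List String) (out : Int) : Decidable (Spec_part1 l out) := by unfold Spec_part1; infer_instance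

-- ===== CLAIM (what is proved, stated in full; the proofs are below) =====
def Claim_equal_part1 : Prop := ∀ (l : List String), Dom_part1 l → Spec_part1 l (part1 l)

-- ===== LEMMAS AND PROOFS =====

-- a single-character needle occurs in s iff the character is a member
theorem find_single_ne_neg_one_iff (s : String) (c : Char) :
    PySem.Str.find s (String.ofList [c]) ≠ -1 ↔ c ∈ s.toList := by
  rw [PySem.Str.find_ne_neg_one_iff]
  have h : (String.ofList [c]).toList = [c] := by simp
  rw [h]
  constructor
  · intro h2
    exact h2.subset (by simp)
  · intro h2
    obtain ⟨t, u, htu⟩ := List.append_of_mem h2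
    exact ⟨t, u, by simp [htu]⟩

-- two nodup lists filtered by membership in each other have equal lengths
theorem length_filter_mem_comm (xs ys : List Char)
    (hx : xs.Nodup) (hy : ys.Nodup) :
    (xs.filter (fun c => decide (c ∈ ys))).length
      = (ys.filter (fun c => decide (c ∈ xs))).length := by
  apply List.Perm.length_eq
  rw [List.perm_ext_iff_of_nodup (hx.filter _) (hy.filter _)]
  intro a
  simp [and_comm]

-- per-group agreement: A's 26 find-tests count what B's set intersection counts
theorem group_count (i : String) :
    (pvQuestions.countP (fun j => decide (PySem.Str.find i j ≠ -1)) : Int)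
      = (PySem.Set.len (PySem.Set.inter (PySem.Set.ofList i.toList) pvLower) : Int) := by
  have hmap : pvQuestions
      = ("abcdefghijklmnopqrstuvwxyz".toList).map (fun c => String.ofList [c]) := by decide
  rw [hmap, List.countP_map]
  have h1 : ((fun j => decide (PySem.Str.find i j ≠ -1)) ∘ (fun c => String.ofList [c]))
      = (fun c => decide (c ∈ i.toList)) := by
    funext c
    simp only [Function.comp_apply, decide_eq_decide]
    exact find_single_ne_neg_one_iff i c
  rw [h1, List.countP_eq_length_filter]
  have hinter : PySem.Set.inter (PySem.Set.ofList i.toList) pvLower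
      = (PySem.Set.ofList i.toList).filter (fun c => PySem.Set.contains pvLower c) := rfl
  have hc : ((PySem.Set.ofList i.toList).filter (fun c => PySem.Set.contains pvLower c))
      = ((PySem.Set.ofList i.toList).filter
          (fun c => decide (c ∈ "abcdefghijklmnopqrstuvwxyz".toList))) := by
    apply List.filter_congr
    intro c _
    simp [pvLower, PySem.Set.mem_ofList]
  have hlen := length_filter_mem_comm ("abcdefghijklmnopqrstuvwxyz".toList)
    (PySem.Set.ofList i.toList) (by decide) (PySem.Set.nodup_ofList _)
  have he : ("abcdefghijklmnopqrstuvwxyz".toList).filter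
        (fun c => decide (c ∈ PySem.Set.ofList i.toList))
      = ("abcdefghijklmnopqrstuvwxyz".toList).filter (fun c => decide (c ∈ i.toList)) := by
    apply List.filter_congr
    intro c _
    simp [PySem.Set.mem_ofList]
  rw [he] at hlen
  rw [PySem.Set.len, hinter, hc, hlen]

-- ===== VERDICT (by name: the statement is the Claim_ definition above) =====
theorem part1_spec : Claim_equal_part1 := by
  intro l _
  show part1 l = part1_alt l
  unfold part1 part1_alt
  rw [PySem.List.foldl_congr_mem l _ (fun count i => count +
      (pvQuestions.countP (fun j => decide (PySem.Str.find i j ≠ -1)) : Int)) 0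
      (fun acc x _ => PySem.List.foldl_ite_add_one _ pvQuestions acc)]
  rw [PySem.List.foldl_add, zero_add]
  congr 1
  apply List.map_congr_left
  intro i _
  exact group_count i
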